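-- pv_equiv track=rewrite | github.com/KimTorLook/practice | LearnToCodeBySolvingProblems/p5.py | three_ball
-- ===== SOURCE A (Python) =====
-- def three_ball(swap_type:str)->int:
--     ball=1
--     for s in swap_type:    # 將交換的代號及次數放入迴圈
--         if ball == 1:      # 波的位置: 1=左, 2=中, 3=右
--             if s == "A":   # A=左中交換, B=中右, C=左右
--                 ball += 1
--             elif s == "B":
--                 pass
--             elif s == "C":
--                 ball += 2
--
--         elif ball == 2:
--             if s == "A":
--                 ball -= 1
--             elif s == "B":
--                 ball += 1
--             elif s == "C":
--                 pass
--
--         elif ball == 3: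
--             if s == "A":
--                 pass
--             elif s == "B":
--                 ball -= 1
--             elif s == "C":
--                 ball -= 2
--
--     return ball
-- ===== SOURCE B (Python) =====
-- def three_ball(swap_type: str) -> int:
--     # Track the whole arrangement of the three balls (ball at left, middle,
--     # right) instead of one ball's position; read off where ball 1 ends up.
--     left, mid, right = 1, 2, 3
--     for s in swap_type:
--         if s == 'A':
--             left, mid = mid, left
--         elif s == 'B':
--             mid, right = right, mid
--         elif s == 'C':
--             left, right = right, left
--     return 1 if left == 1 else (2 if mid == 1 else 3)
-- ===== Notes on version B (the rewrite author's own statement) =====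
-- stated objective: alternative
-- what changed: Instead of tracking one ball's position with nested position/code branching, B maintains the full arrangement of all three balls (which ball is at left/middle/right), applies each swap code as a plain exchange of two slots independent of where ball 1 is, and only at the end looks up which slot holds ball 1.
import Mathlib
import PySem

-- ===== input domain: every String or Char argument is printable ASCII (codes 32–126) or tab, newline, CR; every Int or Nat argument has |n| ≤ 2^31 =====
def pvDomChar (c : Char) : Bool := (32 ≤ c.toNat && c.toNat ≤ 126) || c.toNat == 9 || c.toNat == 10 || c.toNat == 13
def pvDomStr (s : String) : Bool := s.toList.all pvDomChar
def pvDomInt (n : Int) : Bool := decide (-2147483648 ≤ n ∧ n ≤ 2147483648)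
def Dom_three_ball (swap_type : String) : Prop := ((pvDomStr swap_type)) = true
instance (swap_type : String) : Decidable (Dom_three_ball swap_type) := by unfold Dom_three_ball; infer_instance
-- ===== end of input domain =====

-- B tracks the full arrangement of all three balls and reads off ball 1's slot at the end, instead of A's nested per-position branching on one tracked ball (alternative, same cost).
-- ===== PORT A =====
def three_ball_stepA (ball : Int) (s : Char) : Int :=
  if ball = 1 then
    if s = 'A' then ball + 1
    else if s = 'B' then ball
    else if s = 'C' then ball + 2
    else ball
  else if ball = 2 then
    if s = 'A' then ball - 1
    else if s = 'B' then ball + 1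
    else if s = 'C' then ball
    else ball
  else if ball = 3 then
    if s = 'A' then ball
    else if s = 'B' then ball - 1
    else if s = 'C' then ball - 2
    else ball
  else ball

def three_ball (swap_type : String) : Int :=
  swap_type.toList.foldl three_ball_stepA 1

-- ===== PORT B =====
def three_ball_stepB (st : Int × Int × Int) (s : Char) : Int × Int × Int :=
  if s = 'A' then (st.2.1, st.1, st.2.2)
  else if s = 'B' then (st.1, st.2.2, st.2.1)
  else if s = 'C' then (st.2.2, st.2.1, st.1)
  else st

def three_ball_alt (swap_type : String) : Int :=
  let st := swap_type.toList.foldl three_ball_stepB (1, 2, 3)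
  if st.1 = 1 then 1 else if st.2.1 = 1 then 2 else 3

-- ===== PRECONDITION & SPEC =====
def Spec_three_ball (swap_type : String) (out : Int) : Prop := out = three_ball_alt swap_type
instance (swap_type : String) (out : Int) : Decidable (Spec_three_ball swap_type out) := by unfold Spec_three_ball; infer_instance

-- ===== CLAIM (what is proved, stated in full; the proofs are below) =====
def Claim_equal_three_ball : Prop := ∀ (swap_type : String), Dom_three_ball swap_type → Spec_three_ball swap_type (three_ball swap_type)

-- ===== LEMMAS AND PROOFS =====

-- Invariant: A's tracked ball number names exactly the slot of B's arrangement holding ball 1.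
def three_ball_Inv (ball : Int) (st : Int × Int × Int) : Prop :=
  (ball = 1 ∧ st.1 = 1 ∧ st.2.1 ≠ 1 ∧ st.2.2 ≠ 1) ∨
  (ball = 2 ∧ st.2.1 = 1 ∧ st.1 ≠ 1 ∧ st.2.2 ≠ 1) ∨
  (ball = 3 ∧ st.2.2 = 1 ∧ st.1 ≠ 1 ∧ st.2.1 ≠ 1)

theorem three_ball_Inv_step (ball : Int) (st : Int × Int × Int) (c : Char)
    (h : three_ball_Inv ball st) :
    three_ball_Inv (three_ball_stepA ball c) (three_ball_stepB st c) := by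
  obtain ⟨a, b, d⟩ := st
  unfold three_ball_Inv at h ⊢
  unfold three_ball_stepA three_ball_stepB
  rcases h with ⟨h1, h2, h3, h4⟩ | ⟨h1, h2, h3, h4⟩ | ⟨h1, h2, h3, h4⟩ <;>
    subst h1 <;> split_ifs <;> simp_all

theorem three_ball_Inv_foldl (l : List Char) (ball : Int) (st : Int × Int × Int)
    (h : three_ball_Inv ball st) :
    three_ball_Inv (l.foldl three_ball_stepA ball) (l.foldl three_ball_stepB st) := by
  induction l generalizing ball st with
  | nil => exact h
  | cons c t ih => exact ih _ _ (three_ball_Inv_step ball st c h)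

-- ===== VERDICT (by name: the statement is the Claim_ definition above) =====
theorem three_ball_spec : Claim_equal_three_ball := by
  intro s _
  unfold Spec_three_ball three_ball three_ball_alt
  have h := three_ball_Inv_foldl s.toList 1 (1, 2, 3) (by unfold three_ball_Inv; simp)
  set ball := s.toList.foldl three_ball_stepA 1
  set st := s.toList.foldl three_ball_stepB (1, 2, 3)
  rcases h with ⟨h1, h2, h3, h4⟩ | ⟨h1, h2, h3, h4⟩ | ⟨h1, h2, h3, h4⟩ <;>
    simp [h1, h2, h3, h4]
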